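-- pv_equiv track=rewrite | github.com/andy2167565/leetcode | Medium/1536_minimum-swaps-to-arrange-a-binary-grid/minimum-swaps-to-arrange-a-binary-grid.py | minSwaps
-- ===== SOURCE A (Python) =====
-- from typing import List
--
-- def minSwaps(grid: List[List[int]]) -> int:
--     # Reference: https://leetcode.com/problems/minimum-swaps-to-arrange-a-binary-grid/solutions/768010/python-clean-greedy-solution-with-detailed-explanation-o-n-2/
--     import itertools
--     n, ans, trailing_zeros = len(grid), 0, [len(list(itertools.takewhile(lambda x: not x, row[::-1]))) for row in grid]
--     for i in range(n):
--         for j in range(i, n):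
--             trailing_zeros[i], trailing_zeros[j] = trailing_zeros[j], trailing_zeros[i]
--             if trailing_zeros[i] >= n - i - 1:  # Bring row j to index i
--                 ans += j - i
--                 break
--         else:
--             return -1
--     return ans
-- ===== SOURCE B (Python) =====
-- from typing import List
--
-- def minSwaps(grid: List[List[int]]) -> int:
--     # Shrinking-list greedy: find the first remaining row with enough trailing
--     # zeros, add its current offset, and delete it -- no in-place swap trick.
--     n = len(grid)
--     rem = []
--     for row in grid:
--         c = 0
--         for x in reversed(row):
--             if x:
--                 break
--             c += 1
--         rem.append(c)
--     ans = 0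
--     for i in range(n):
--         for p, t in enumerate(rem):
--             if t >= n - 1 - i:
--                 ans += p
--                 del rem[p]
--                 break
--         else:
--             return -1
--     return ans
-- ===== Notes on version B (the rewrite author's own statement) =====
-- stated objective: simpler
-- what changed: A scans with an in-place swap-with-pivot trick over the full trailing-zeros array and charges j-i per step; B keeps a shrinking list of the remaining rows, finds the first row with enough trailing zeros, adds its current offset and deletes it.
import Mathlib
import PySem

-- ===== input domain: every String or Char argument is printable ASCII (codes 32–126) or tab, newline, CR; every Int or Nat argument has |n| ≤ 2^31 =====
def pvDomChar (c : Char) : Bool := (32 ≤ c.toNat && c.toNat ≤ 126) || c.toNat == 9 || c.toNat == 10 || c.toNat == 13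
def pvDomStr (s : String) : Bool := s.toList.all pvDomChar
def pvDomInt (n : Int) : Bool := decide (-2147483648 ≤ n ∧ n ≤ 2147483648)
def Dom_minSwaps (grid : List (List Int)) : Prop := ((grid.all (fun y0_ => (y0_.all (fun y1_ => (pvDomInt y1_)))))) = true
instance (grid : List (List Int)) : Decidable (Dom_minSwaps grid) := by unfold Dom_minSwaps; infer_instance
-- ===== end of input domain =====

-- B replaces A's in-place swap-with-pivot scan by a shrinking list of remaining
-- rows (find first fitting row, add its offset, delete it); objective: simpler.

-- ===== PORT A =====
-- Python: trailing_zeros[i], trailing_zeros[j] = trailing_zeros[j], trailing_zeros[i]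
-- (RHS read from the original list, then both cells written); indices are always in
-- range at the call sites, so getD's default is never used.
def swapA (l : List Int) (i j : Nat) : List Int :=
  (l.set i (l.getD j 0)).set j (l.getD i 0)

-- Python: 'for j in range(i, n): swap; if trailing_zeros[i] >= n-i-1: ans += j-i; break'
-- fuel = n - i = number of remaining iterations; returns (mutated list, j) or none.
def innerA (n i : Nat) : Nat → Nat → List Int → Option (List Int × Nat)
  | 0, _, _ => none
  | fuel + 1, j, tz =>
      let tz' := swapA tz i j
      if tz'.getD i 0 ≥ (n : Int) - (i : Int) - 1 then some (tz', j)
      else innerA n i fuel (j + 1) tz'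

-- Python: 'for i in range(n): … else: return -1'; fuel = n - i.
def outerA (n : Nat) : Nat → Nat → List Int → Int → Int
  | 0, _, _, ans => ans
  | fuel + 1, i, tz, ans =>
      match innerA n i (n - i) i tz with
      | none => -1
      | some (tz', j) => outerA n fuel (i + 1) tz' (ans + ((j : Int) - (i : Int)))

def minSwaps (grid : List (List Int)) : Int :=
  let n := grid.length
  let trailing_zeros :=
    grid.map (fun row => (((row.reverse.takeWhile (fun x => x == 0)).length : Nat) : Int))
  outerA n n 0 trailing_zeros 0

-- ===== PORT B =====
-- Python B: 'c = 0; for x in reversed(row): if x: break; c += 1'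
def tzCount : List Int → Int
  | [] => 0
  | x :: rest => if x ≠ 0 then 0 else tzCount rest + 1

-- Python B: 'for p, t in enumerate(rem): if t >= bound: ans += p; del rem[p]; break'
-- returns (p, t, rem with entry p deleted) or none.
def innerB (bound : Int) : List Int → Option (Nat × Int × List Int)
  | [] => none
  | t :: rest =>
      if t ≥ bound then some (0, t, rest)
      else (innerB bound rest).map (fun x => (x.1 + 1, x.2.1, t :: x.2.2))

def outerB (n : Nat) : Nat → Nat → List Int → Int → Int
  | 0, _, _, ans => ans
  | fuel + 1, i, rem, ans =>
      match innerB ((n : Int) - (i : Int) - 1) rem with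
      | none => -1
      | some (p, _, rem') => outerB n fuel (i + 1) rem' (ans + (p : Int))

def minSwaps_alt (grid : List (List Int)) : Int :=
  let n := grid.length
  outerB n n 0 (grid.map (fun row => tzCount row.reverse)) 0

-- ===== PRECONDITION & SPEC =====
def Spec_minSwaps (grid : List (List Int)) (out : Int) : Prop := out = minSwaps_alt grid
instance (grid : List (List Int)) (out : Int) : Decidable (Spec_minSwaps grid out) := by unfold Spec_minSwaps; infer_instance

-- ===== CLAIM (what is proved, stated in full; the proofs are below) =====
def Claim_equal_minSwaps : Prop := ∀ (grid : List (List Int)), Dom_minSwaps grid → Spec_minSwaps grid (minSwaps grid)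

-- ===== LEMMAS AND PROOFS =====

lemma tzCount_eq (l : List Int) :
    tzCount l = (((l.takeWhile (fun x => x == 0)).length : Nat) : Int) := by
  induction l with
  | nil => simp [tzCount]
  | cons x rest ih =>
    simp only [tzCount, List.takeWhile_cons]
    by_cases hx : x = 0
    · simp [hx, ih]
    · simp [hx]

lemma set_append_cons (pre : List Int) (t v : Int) (rest : List Int) :
    (pre ++ t :: rest).set pre.length v = pre ++ v :: rest := by
  induction pre with
  | nil => simp
  | cons a pre ih => simp [ih]

lemma getD_append_cons (pre : List Int) (t : Int) (rest : List Int) :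
    (pre ++ t :: rest).getD pre.length 0 = t := by
  induction pre with
  | nil => simp
  | cons a pre ih => simp only [List.cons_append]; exact ih

lemma innerB_length {bound : Int} {l : List Int} {p : Nat} {v : Int} {r : List Int}
    (h : innerB bound l = some (p, v, r)) : r.length + 1 = l.length := by
  induction l generalizing p v r with
  | nil => simp [innerB] at h
  | cons t rest ih =>
    simp only [innerB] at h
    split at h
    · simp at h; obtain ⟨_, _, hr⟩ := h; subst hr; simp
    · cases hrec : innerB bound rest with
      | none => simp [hrec] at h
      | some x =>
        simp [hrec] at h
        obtain ⟨_, _, hr⟩ := h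
        have := ih hrec
        subst hr
        simp at this ⊢
        omega

-- The state of A's inner loop after at least one failed iteration:
-- tz = pre ++ h :: mid ++ rest, current pivot h at index i = |pre|,
-- already-rotated block mid, unscanned rest, j = i + 1 + |mid|.
lemma Lin (n : Nat) (rest : List Int) :
    ∀ (mid : List Int) (h : Int) (pre : List Int) (j : Nat),
    n = pre.length + 1 + mid.length + rest.length →
    j = pre.length + 1 + mid.length →
    innerA n pre.length rest.length j (pre ++ h :: (mid ++ rest)) =
      (innerB ((n : Int) - (pre.length : Int) - 1) rest).map
        (fun x => (pre ++ x.2.1 :: (mid ++ h :: x.2.2), j + x.1)) := by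
  induction rest with
  | nil => intro mid h pre j _ _; simp [innerA, innerB]
  | cons r0 rest' ih =>
    intro mid h pre j hn hj
    have hget_j : (pre ++ h :: (mid ++ r0 :: rest')).getD j 0 = r0 := by
      have : pre ++ h :: (mid ++ r0 :: rest') = (pre ++ h :: mid) ++ r0 :: rest' := by
        simp
      rw [this, hj]
      have hlen : (pre ++ h :: mid).length = pre.length + 1 + mid.length := by
        simp; omega
      rw [← hlen]
      exact getD_append_cons _ _ _
    have hget_i : (pre ++ h :: (mid ++ r0 :: rest')).getD pre.length 0 = h :=
      getD_append_cons _ _ _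
    have hswap : swapA (pre ++ h :: (mid ++ r0 :: rest')) pre.length j =
        pre ++ r0 :: (mid ++ h :: rest') := by
      unfold swapA
      rw [hget_j, hget_i, set_append_cons]
      have : pre ++ r0 :: (mid ++ r0 :: rest') = (pre ++ r0 :: mid) ++ r0 :: rest' := by
        simp
      rw [this, hj]
      have hlen : (pre ++ r0 :: mid).length = pre.length + 1 + mid.length := by
        simp; omega
      rw [← hlen, set_append_cons]
      simp
    have hget_i' : (pre ++ r0 :: (mid ++ h :: rest')).getD pre.length 0 = r0 :=
      getD_append_cons _ _ _
    simp only [List.length_cons, innerA, hswap, hget_i']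
    by_cases hc : r0 ≥ (n : Int) - (pre.length : Int) - 1
    · simp only [innerB, if_pos hc, Option.map_some]
      simp
    · simp only [innerB, if_neg hc]
      have hrec := ih (mid ++ [h]) r0 pre (j + 1)
        (by simp only [List.length_append, List.length_cons, List.length_nil] at hn ⊢; omega)
        (by simp only [List.length_append, List.length_cons, List.length_nil]; omega)
      simp only [List.append_assoc, List.cons_append, List.nil_append] at hrec
      rw [hrec]
      cases innerB ((n : Int) - (pre.length : Int) - 1) rest' with
      | none => simp
      | some x =>
        simp only [Option.map_some]
        refine congrArg some (Prod.ext ?_ ?_)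
        · simp
        · simp only []
          omega

-- The first iteration (j = i) of A's inner loop: the self-swap is the identity.
lemma Linit (suf pre : List Int) (n : Nat) (hn : n = pre.length + suf.length) :
    innerA n pre.length suf.length pre.length (pre ++ suf) =
      (innerB ((n : Int) - (pre.length : Int) - 1) suf).map
        (fun x => (pre ++ x.2.1 :: x.2.2, pre.length + x.1)) := by
  cases suf with
  | nil => simp [innerA, innerB]
  | cons t rest =>
    have hget_i : (pre ++ t :: rest).getD pre.length 0 = t := getD_append_cons _ _ _
    have hswap : swapA (pre ++ t :: rest) pre.length pre.length = pre ++ t :: rest := by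
      unfold swapA
      rw [hget_i, set_append_cons, set_append_cons]
    simp only [List.length_cons, innerA, hswap, hget_i]
    by_cases hc : t ≥ (n : Int) - (pre.length : Int) - 1
    · simp only [innerB, if_pos hc, Option.map_some]
      simp
    · simp only [innerB, if_neg hc]
      have hrec := Lin n rest [] t pre (pre.length + 1) (by simp only [List.length_cons, List.length_nil] at hn ⊢; omega) (by simp)
      simp only [List.nil_append] at hrec
      rw [hrec]
      cases innerB ((n : Int) - (pre.length : Int) - 1) rest with
      | none => simp
      | some x =>
        simp only [Option.map_some]
        refine congrArg some (Prod.ext ?_ ?_)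
        · simp
        · simp; omega

lemma Lout (n : Nat) : ∀ (fuel : Nat) (pre rem : List Int) (ans : Int),
    n = pre.length + rem.length → fuel = rem.length →
    outerA n fuel pre.length (pre ++ rem) ans = outerB n fuel pre.length rem ans := by
  intro fuel
  induction fuel with
  | zero => intro pre rem ans _ _; simp [outerA, outerB]
  | succ fuel ih =>
    intro pre rem ans hn hf
    have hsub : n - pre.length = rem.length := by omega
    simp only [outerA, outerB, hsub]
    rw [Linit rem pre n hn]
    cases hb : innerB ((n : Int) - (pre.length : Int) - 1) rem with
    | none => simp
    | some x =>
      obtain ⟨p, v, rem'⟩ := x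
      simp only [Option.map_some]
      have hlen := innerB_length hb
      have h1 : pre ++ v :: rem' = (pre ++ [v]) ++ rem' := by simp
      have h2 : pre.length + 1 = (pre ++ [v]).length := by simp
      rw [h1, h2, ih (pre ++ [v]) rem' _ (by simp; omega) (by omega)]
      have h3 : ((pre.length + p : Nat) : Int) - (pre.length : Int) = (p : Int) := by
        push_cast; ring
      rw [h3]

-- ===== VERDICT (by name: the statement is the Claim_ definition above) =====
theorem minSwaps_spec : Claim_equal_minSwaps := by
  intro grid _
  show minSwaps grid = minSwaps_alt grid
  unfold minSwaps minSwaps_alt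
  have hmap : grid.map (fun row => (((row.reverse.takeWhile (fun x => x == 0)).length : Nat) : Int))
      = grid.map (fun row => tzCount row.reverse) := by
    refine List.map_congr_left ?_
    intro row _
    rw [tzCount_eq]
  rw [hmap]
  have := Lout grid.length grid.length [] (grid.map (fun row => tzCount row.reverse)) 0
    (by simp) (by simp)
  simpa using this
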